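-- pv_equiv track=rewrite | github.com/ecotaxa/ecotaxa_front | appli/part/drawchart.py | GetTaxoHistoLimit
-- ===== SOURCE A (Python) =====
-- DepthTaxoHistoLimit=[0,25,50,75,100,125,150,200,250,300,350,400,450,500,600,700,800,900,1000,1250,1500,1750,2000,2250,2500,2750
--     ,3000,3250,3500,3750,4000,4250,4500,4750,5000,5250,5500,5750,6000,7000,8000,9000,10000,11000,12000,13000,14000,15000,20000,50000]
--
-- def GetTaxoHistoLimit(MaxDepth):
--     Res=[]
--     BreakOnNext=False
--     for d in DepthTaxoHistoLimit:
--         Res.append(d)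
--         if BreakOnNext:
--             break
--         if d>MaxDepth:
--             BreakOnNext=True
--     return Res
-- ===== SOURCE B (Python) =====
-- DepthTaxoHistoLimit=[0,25,50,75,100,125,150,200,250,300,350,400,450,500,600,700,800,900,1000,1250,1500,1750,2000,2250,2500,2750
--     ,3000,3250,3500,3750,4000,4250,4500,4750,5000,5250,5500,5750,6000,7000,8000,9000,10000,11000,12000,13000,14000,15000,20000,50000]
--
-- def GetTaxoHistoLimit(MaxDepth):
--     # count the leading limits <= MaxDepth, then take that prefix plus two more
--     # elements in one slice (slicing clamps when nothing exceeds MaxDepth)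
--     k = 0
--     n = len(DepthTaxoHistoLimit)
--     while k < n and DepthTaxoHistoLimit[k] <= MaxDepth:
--         k += 1
--     return DepthTaxoHistoLimit[:k + 2]
-- ===== Notes on version B (the rewrite author's own statement) =====
-- stated objective: simpler
-- what changed: Replaced the append-until-exceed loop with flag state by a count of the leading limits <= MaxDepth followed by a single clamping slice [:k+2]; no accumulator or break flag.
import Mathlib
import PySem

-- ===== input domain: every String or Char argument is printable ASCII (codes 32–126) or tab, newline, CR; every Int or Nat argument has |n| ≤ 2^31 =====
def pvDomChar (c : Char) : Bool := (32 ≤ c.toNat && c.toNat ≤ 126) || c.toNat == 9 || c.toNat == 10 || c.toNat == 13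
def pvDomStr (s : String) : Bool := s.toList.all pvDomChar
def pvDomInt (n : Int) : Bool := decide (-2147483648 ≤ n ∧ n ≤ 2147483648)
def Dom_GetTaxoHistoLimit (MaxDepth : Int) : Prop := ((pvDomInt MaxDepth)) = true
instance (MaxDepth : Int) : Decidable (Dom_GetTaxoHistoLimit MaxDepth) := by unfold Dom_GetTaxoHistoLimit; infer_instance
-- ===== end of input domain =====

-- B replaces A's append-until-exceed loop (accumulator + break flag) by counting the ≤-prefix and taking one clamping slice (simpler).

-- the module-level constant DepthTaxoHistoLimit (shared by both sources)
def depthTaxoHistoLimit : List Int :=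
  [0,25,50,75,100,125,150,200,250,300,350,400,450,500,600,700,800,900,1000,1250,1500,1750,2000,2250,2500,2750
    ,3000,3250,3500,3750,4000,4250,4500,4750,5000,5250,5500,5750,6000,7000,8000,9000,10000,11000,12000,13000,14000,15000,20000,50000]

-- ===== PORT A =====
-- the for-loop over DepthTaxoHistoLimit with the Res accumulator and the BreakOnNext flag (break = stop recursing)
def pvALoop (MaxDepth : Int) : List Int → List Int → Bool → List Int
  | [], res, _ => res
  | d :: rest, res, breakOnNext =>
    let res' := res ++ [d]
    if breakOnNext then res'
    else if d > MaxDepth then pvALoop MaxDepth rest res' true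
    else pvALoop MaxDepth rest res' false

def GetTaxoHistoLimit (MaxDepth : Int) : List Int :=
  pvALoop MaxDepth depthTaxoHistoLimit [] false

-- ===== PORT B =====
-- the while-loop 'k < n and L[k] <= MaxDepth: k += 1' as structural recursion counting the ≤-prefix
def pvCountLe (MaxDepth : Int) : List Int → Nat
  | [] => 0
  | d :: rest => if d ≤ MaxDepth then pvCountLe MaxDepth rest + 1 else 0

-- the slice L[:k+2] with 0 ≤ k is List.take (k+2)
def GetTaxoHistoLimit_alt (MaxDepth : Int) : List Int :=
  let k := pvCountLe MaxDepth depthTaxoHistoLimit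
  depthTaxoHistoLimit.take (k + 2)

-- ===== PRECONDITION & SPEC =====
def Spec_GetTaxoHistoLimit (MaxDepth : Int) (out : List Int) : Prop := out = GetTaxoHistoLimit_alt MaxDepth
instance (MaxDepth : Int) (out : List Int) : Decidable (Spec_GetTaxoHistoLimit MaxDepth out) := by unfold Spec_GetTaxoHistoLimit; infer_instance

-- ===== CLAIM (what is proved, stated in full; the proofs are below) =====
def Claim_equal_GetTaxoHistoLimit : Prop := ∀ (MaxDepth : Int), Dom_GetTaxoHistoLimit MaxDepth → Spec_GetTaxoHistoLimit MaxDepth (GetTaxoHistoLimit MaxDepth)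

-- ===== LEMMAS AND PROOFS =====

-- once BreakOnNext is set, the loop appends one more element and stops
lemma pvALoop_true (MaxDepth : Int) (L res : List Int) :
    pvALoop MaxDepth L res true = res ++ L.take 1 := by
  cases L <;> simp [pvALoop]

-- the scan returns the prefix of length (count of leading ≤ elements) + 2
lemma pvALoop_eq_take (MaxDepth : Int) (L res : List Int) :
    pvALoop MaxDepth L res false = res ++ L.take (pvCountLe MaxDepth L + 2) := by
  induction L generalizing res with
  | nil => simp [pvALoop, pvCountLe]
  | cons d t ih =>
    by_cases hd : d ≤ MaxDepth
    · have hnot : ¬ d > MaxDepth := not_lt.mpr hd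
      simp only [pvALoop, if_neg (Bool.false_ne_true), if_neg hnot, pvCountLe, if_pos hd]
      rw [ih]
      simp [List.take_succ_cons]
    · have hgt : d > MaxDepth := lt_of_not_ge hd
      simp only [pvALoop, if_neg (Bool.false_ne_true), if_pos hgt, pvALoop_true,
        pvCountLe, if_neg hd]
      simp [List.take]

-- ===== VERDICT (by name: the statement is the Claim_ definition above) =====
theorem GetTaxoHistoLimit_spec : Claim_equal_GetTaxoHistoLimit := by
  intro MaxDepth _
  show GetTaxoHistoLimit MaxDepth = GetTaxoHistoLimit_alt MaxDepth
  unfold GetTaxoHistoLimit GetTaxoHistoLimit_alt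
  rw [pvALoop_eq_take]
  simp
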